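-- pv_equiv track=rewrite | github.com/TomMorro/RoPaSci_360 | skeleton-code-B/dwayne_johnson/simulate.py | prune_rows
-- ===== SOURCE A (Python) =====
-- def prune_rows(new_pair, previous_pairs):
--     """
--     Prune moves based on whether they get dominated
--     Args:
--         new_pair: the new pair of the move and its' evaluation for every opposing move
--         previous_pairs: the previous pairs of moves and evaluations
--
--     Returns: a new list of pairs, where dominated moves have been pruned out
--
--     """
--     updated_pairs = []
--
--     if previous_pairs:
--         for previous_pair in previous_pairs:
--             value = compare_rows(new_pair, previous_pair)
--             if value == 1:
--                 return previous_pairs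
--             elif value == 0:
--                 updated_pairs.append(previous_pair)
--
--     updated_pairs.append(new_pair)
--     return updated_pairs
--
-- def compare_rows(row1, row2):
--     """
--     Compares two moves
--     Args:
--         row1: a list containing the first move's evaluations
--         row2: a list containing the second move's evaluations
--
--     Returns: 1 if the first move is dominated, -1 if the second move is dominated, 0 if neither are dominated
--
--     """
--     row1_dominated = True
--     row2_dominated = True
--
--     if len(row1[1]) == 0:
--         return 0
--
--     for i in range(0, len(row1[1])):
--         if row1[1][i] > row2[1][i]:
--             row1_dominated = False
--         elif row1[1][i] < row2[1][i]:
--             row2_dominated = False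
--         if not row1_dominated and not row2_dominated:
--             break
--
--     if row1_dominated:
--         return 1
--     if row2_dominated:
--         return -1
--     return 0
-- ===== SOURCE B (Python) =====
-- def _le_all(n, p):
--     return all(n[i] <= p[i] for i in range(len(n)))
--
--
-- def _ge_all(n, p):
--     return all(n[i] >= p[i] for i in range(len(n)))
--
--
-- def prune_rows(new_pair, previous_pairs):
--     n = new_pair[1]
--     if n and any(_le_all(n, p[1]) for p in previous_pairs):
--         return previous_pairs
--     kept = [p for p in previous_pairs if not n or not _ge_all(n, p[1])]
--     return kept + [new_pair]
-- ===== Notes on version B (the rewrite author's own statement) =====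
-- stated objective: simpler
-- what changed: Replaces the flag-carrying compare_rows loop and the accumulator loop with early return by a two-phase formulation: an any() scan for a previous row that dominates the new one, then a list comprehension filtering out rows the new row dominates.
import Mathlib
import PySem

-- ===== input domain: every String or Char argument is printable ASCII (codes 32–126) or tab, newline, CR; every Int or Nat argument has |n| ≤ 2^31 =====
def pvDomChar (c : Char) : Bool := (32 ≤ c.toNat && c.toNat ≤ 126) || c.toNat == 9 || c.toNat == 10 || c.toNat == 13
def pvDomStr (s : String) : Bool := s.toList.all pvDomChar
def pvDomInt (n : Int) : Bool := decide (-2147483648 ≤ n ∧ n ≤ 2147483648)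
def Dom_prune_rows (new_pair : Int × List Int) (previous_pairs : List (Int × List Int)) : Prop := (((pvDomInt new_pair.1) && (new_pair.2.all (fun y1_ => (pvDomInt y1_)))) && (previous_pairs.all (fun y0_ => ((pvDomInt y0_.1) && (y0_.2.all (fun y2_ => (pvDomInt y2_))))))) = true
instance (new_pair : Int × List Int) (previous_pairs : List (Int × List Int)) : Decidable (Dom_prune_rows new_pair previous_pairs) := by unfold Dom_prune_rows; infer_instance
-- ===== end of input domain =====

-- B replaces A's flag-carrying compare loop and accumulator loop by an any() dominance scan plus a filtering comprehension (simpler decomposition, same cost).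


-- ===== PORT A =====
-- Loop of compare_rows: two flags, `break` when both are false; indexing is exact on
-- in-range indices (Pre_ keeps them in range; outside, Python raises IndexError).
def compareLoop (r1 r2 : List Int) : List Int → Bool → Bool → Bool × Bool
  | [], d1, d2 => (d1, d2)
  | i :: rest, d1, d2 =>
    let a := (PySem.List.pyGet? r1 i).getD 0
    let b := (PySem.List.pyGet? r2 i).getD 0
    let d1' := if a > b then false else d1
    let d2' := if a > b then d2 else if a < b then false else d2
    if !d1' && !d2' then (d1', d2') else compareLoop r1 r2 rest d1' d2'

def compare_rows (row1 row2 : Int × List Int) : Int :=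
  if row1.2.length = 0 then 0
  else
    let r := compareLoop row1.2 row2.2 (PySem.List.pyRange 0 row1.2.length 1) true true
    if r.1 then 1 else if r.2 then -1 else 0

def pruneLoop (new_pair : Int × List Int) (previous_pairs : List (Int × List Int)) :
    List (Int × List Int) → List (Int × List Int) → List (Int × List Int)
  | [], acc => acc ++ [new_pair]
  | p :: rest, acc =>
    let v := compare_rows new_pair p
    if v = 1 then previous_pairs
    else if v = 0 then pruneLoop new_pair previous_pairs rest (acc ++ [p])
    else pruneLoop new_pair previous_pairs rest acc

def prune_rows (new_pair : Int × List Int) (previous_pairs : List (Int × List Int)) : List (Int × List Int) :=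
  pruneLoop new_pair previous_pairs previous_pairs []

-- ===== PORT B =====
def allLe (n p : List Int) : Bool :=
  (PySem.List.pyRange 0 n.length 1).all
    (fun i => (PySem.List.pyGet? n i).getD 0 ≤ (PySem.List.pyGet? p i).getD 0)

def allGe (n p : List Int) : Bool :=
  (PySem.List.pyRange 0 n.length 1).all
    (fun i => (PySem.List.pyGet? n i).getD 0 ≥ (PySem.List.pyGet? p i).getD 0)

def prune_rows_alt (new_pair : Int × List Int) (previous_pairs : List (Int × List Int)) : List (Int × List Int) :=
  if !new_pair.2.isEmpty && previous_pairs.any (fun p => allLe new_pair.2 p.2) then previous_pairs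
  else (previous_pairs.filter (fun p => new_pair.2.isEmpty || !allGe new_pair.2 p.2)) ++ [new_pair]

-- ===== PRECONDITION & SPEC =====
-- Pre_ holds exactly when Python A returns normally: it fails only when A's scan reaches a
-- previous row whose vector is shorter than the new row's vector without an earlier
-- dominating row and without breaking early; there A (and B) raise IndexError.
def preDominates (n p : List Int) : Bool :=
  decide (n.length ≤ p.length) && (List.range n.length).all (fun a => decide (n.getD a 0 ≤ p.getD a 0))
def preBreaks (n p : List Int) : Bool :=
  (List.range p.length).any (fun a => decide (n.getD a 0 > p.getD a 0)) &&
  (List.range p.length).any (fun a => decide (n.getD a 0 < p.getD a 0))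
def Pre_prune_rows (new_pair : Int × List Int) (previous_pairs : List (Int × List Int)) : Prop :=
  ∀ j < previous_pairs.length,
    (previous_pairs.getD j (0, [])).2.length < new_pair.2.length →
    ((previous_pairs.take j).any (fun p => preDominates new_pair.2 p.2) = true
      ∨ preBreaks new_pair.2 (previous_pairs.getD j (0, [])).2 = true)
instance (new_pair : Int × List Int) (previous_pairs : List (Int × List Int)) : Decidable (Pre_prune_rows new_pair previous_pairs) := by unfold Pre_prune_rows; infer_instance
def pvWitness_prune_rows : (Int × List Int) × (List (Int × List Int)) :=
  ((1, [1, 2]), [(2, [3, 0]), (0, [0, 5, 7])])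

def Spec_prune_rows (new_pair : Int × List Int) (previous_pairs : List (Int × List Int)) (out : List (Int × List Int)) : Prop := out = prune_rows_alt new_pair previous_pairs
instance (new_pair : Int × List Int) (previous_pairs : List (Int × List Int)) (out : List (Int × List Int)) : Decidable (Spec_prune_rows new_pair previous_pairs out) := by unfold Spec_prune_rows; infer_instance

-- ===== CLAIM (what is proved, stated in full; the proofs are below) =====
def Claim_equal_prune_rows : Prop := ∀ (new_pair : Int × List Int) (previous_pairs : List (Int × List Int)), Dom_prune_rows new_pair previous_pairs → Pre_prune_rows new_pair previous_pairs → Spec_prune_rows new_pair previous_pairs (prune_rows new_pair previous_pairs)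

-- ===== LEMMAS AND PROOFS =====

-- The break-loop computes exactly "d1 && all ≤" and "d2 && all ≥" over the index list.
theorem compareLoop_eq (r1 r2 : List Int) :
    ∀ (idxs : List Int) (d1 d2 : Bool),
      compareLoop r1 r2 idxs d1 d2 =
        (d1 && idxs.all (fun i => (PySem.List.pyGet? r1 i).getD 0 ≤ (PySem.List.pyGet? r2 i).getD 0),
         d2 && idxs.all (fun i => (PySem.List.pyGet? r1 i).getD 0 ≥ (PySem.List.pyGet? r2 i).getD 0)) := by
  intro idxs
  induction idxs with
  | nil => intro d1 d2; simp [compareLoop]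
  | cons i rest ih =>
    intro d1 d2
    simp only [compareLoop, List.all_cons]
    set a := (PySem.List.pyGet? r1 i).getD 0 with ha
    set b := (PySem.List.pyGet? r2 i).getD 0 with hb
    by_cases hgt : a > b
    · by_cases hlt : a < b
      · omega
      · simp only [if_pos hgt]
        by_cases hd2 : d2 = true
        · subst hd2
          simp [ih, show ¬ (a ≤ b) by omega, show b ≤ a by omega]
        · simp at hd2; subst hd2
          simp [show ¬ (a ≤ b) by omega]
    · by_cases hlt : a < b
      · simp only [if_neg hgt, if_pos hlt]
        by_cases hd1 : d1 = true
        · subst hd1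
          simp [ih, show a ≤ b by omega, show ¬ (b ≤ a) by omega]
        · simp at hd1; subst hd1
          simp [show ¬ (b ≤ a) by omega]
      · have hab : a ≤ b := by omega
        have hba : b ≤ a := by omega
        simp only [if_neg hgt, if_neg hlt]
        by_cases hd1 : d1 = true <;> by_cases hd2 : d2 = true <;>
          simp_all

-- compare_rows in terms of B's predicates.
theorem compare_rows_eq (new_pair p : Int × List Int) :
    compare_rows new_pair p =
      if new_pair.2.isEmpty then 0
      else if allLe new_pair.2 p.2 then 1
      else if allGe new_pair.2 p.2 then -1 else 0 := by
  simp only [compare_rows, compareLoop_eq, allLe, allGe, List.isEmpty_iff,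
    List.length_eq_zero_iff]
  split_ifs <;> simp_all

theorem pruneLoop_dominated (new_pair : Int × List Int) (prevs : List (Int × List Int)) :
    ∀ (rest acc : List (Int × List Int)),
      rest.any (fun p => compare_rows new_pair p == 1) = true →
      pruneLoop new_pair prevs rest acc = prevs := by
  intro rest
  induction rest with
  | nil => simp
  | cons p rest ih =>
    intro acc h
    simp only [List.any_cons, Bool.or_eq_true, beq_iff_eq] at h
    simp only [pruneLoop]
    by_cases h1 : compare_rows new_pair p = 1
    · simp [h1]
    · have hrest : rest.any (fun q => compare_rows new_pair q == 1) = true := by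
        rcases h with h | h
        · exact absurd h h1
        · exact h
      split_ifs with hv0
      · exact ih _ hrest
      · exact ih _ hrest

theorem pruneLoop_no_dom (new_pair : Int × List Int) (prevs : List (Int × List Int)) :
    ∀ (rest acc : List (Int × List Int)),
      rest.any (fun p => compare_rows new_pair p == 1) = false →
      pruneLoop new_pair prevs rest acc =
        acc ++ rest.filter (fun p => compare_rows new_pair p == 0) ++ [new_pair] := by
  intro rest
  induction rest with
  | nil => simp [pruneLoop]
  | cons p rest ih =>
    intro acc h
    simp only [List.any_cons, Bool.or_eq_false_iff, beq_eq_false_iff_ne, ne_eq] at h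
    simp only [pruneLoop, List.filter_cons]
    rw [if_neg h.1]
    have hrest : rest.any (fun q => compare_rows new_pair q == 1) = false := by
      simp [h.2]
    by_cases hv0 : compare_rows new_pair p = 0
    · rw [if_pos hv0, show (compare_rows new_pair p == 0) = true by simp [hv0]]
      simp only [if_true]
      rw [ih _ hrest]
      simp
    · rw [if_neg hv0, show (compare_rows new_pair p == 0) = false by simp [hv0]]
      simp only [Bool.false_eq_true, if_false]
      exact ih _ hrest

-- the two dominance tests coincide with compare_rows' outcomes
theorem dom1_iff (new_pair p : Int × List Int) :
    (compare_rows new_pair p == 1) = (!new_pair.2.isEmpty && allLe new_pair.2 p.2) := by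
  rw [compare_rows_eq]
  split_ifs <;> simp_all

theorem any_and_left (c : Bool) {α : Type} (f : α → Bool) (l : List α) :
    l.any (fun p => c && f p) = (c && l.any f) := by
  cases c <;> simp

theorem any_dom (new_pair : Int × List Int) (l : List (Int × List Int)) :
    l.any (fun p => compare_rows new_pair p == 1) =
      (!new_pair.2.isEmpty && l.any (fun p => allLe new_pair.2 p.2)) := by
  rw [show (fun p => compare_rows new_pair p == 1) =
      (fun p : Int × List Int => !new_pair.2.isEmpty && allLe new_pair.2 p.2) from
    funext (fun p => dom1_iff new_pair p)]
  exact any_and_left _ _ _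

-- ===== VERDICT (by name: the statement is the Claim_ definition above) =====
theorem prune_rows_spec : Claim_equal_prune_rows := by
  intro new_pair previous_pairs _ _
  unfold Spec_prune_rows prune_rows prune_rows_alt
  by_cases hc : (!new_pair.2.isEmpty && previous_pairs.any (fun p => allLe new_pair.2 p.2)) = true
  · rw [if_pos hc]
    exact pruneLoop_dominated _ _ _ _ ((any_dom _ _).trans hc)
  · rw [if_neg hc]
    have hc' : (!new_pair.2.isEmpty && previous_pairs.any (fun p => allLe new_pair.2 p.2)) = false :=
      Bool.eq_false_iff.mpr hc
    rw [pruneLoop_no_dom _ _ _ _ ((any_dom _ _).trans hc')]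
    simp only [List.nil_append]
    congr 1
    apply List.filter_congr
    intro p hp
    rw [compare_rows_eq]
    by_cases he : new_pair.2.isEmpty
    · simp [he]
    · have hne : (!new_pair.2.isEmpty) = true := by simp [he]
      have hany : previous_pairs.any (fun q => allLe new_pair.2 q.2) = false := by
        rw [hne, Bool.true_and] at hc'
        exact hc'
      have hle : allLe new_pair.2 p.2 = false := by
        rw [List.any_eq_false] at hany
        simpa using hany p hp
      cases hg : allGe new_pair.2 p.2 <;> simp [he, hle]
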